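-- pv_equiv track=rewrite | github.com/KartikaySingh30/Data-Obfuscation | myfile.py | mask_letters
-- ===== SOURCE A (Python) =====
-- def mask_letters(data):
--     obfuscated_data = ""
--     for i, char in enumerate(data):
--         if i % 2 == 0:
--             obfuscated_data += char
--         else:
--             obfuscated_data += "*"
--     return obfuscated_data
-- ===== SOURCE B (Python) =====
-- def mask_letters(data):
--     lst = list(data)
--     lst[1::2] = "*" * (len(data) // 2)
--     return "".join(lst)
-- ===== Notes on version B (the rewrite author's own statement) =====
-- stated objective: faster
-- what changed: Replaces the per-character enumerate loop with branch and repeated string concatenation by building a character list once and overwriting all odd positions via one strided slice assignment of len(data)//2 asterisks, joined at the end.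
import Mathlib
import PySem

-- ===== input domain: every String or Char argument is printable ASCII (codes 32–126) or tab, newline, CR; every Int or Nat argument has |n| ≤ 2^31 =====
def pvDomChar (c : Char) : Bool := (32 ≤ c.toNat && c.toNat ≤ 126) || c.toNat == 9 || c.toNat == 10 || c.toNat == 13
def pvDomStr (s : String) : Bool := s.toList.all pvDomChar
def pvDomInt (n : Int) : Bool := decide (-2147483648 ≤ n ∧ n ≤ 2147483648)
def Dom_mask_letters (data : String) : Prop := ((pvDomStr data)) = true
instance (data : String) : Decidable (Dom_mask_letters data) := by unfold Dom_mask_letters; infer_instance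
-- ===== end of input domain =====

-- B replaces the per-character enumerate loop by a bulk slice assignment lst[1::2] = '*' * (len//2) over a list built once (idiomatic).


-- ===== PORT A =====
-- for i, char in enumerate(data): acc += char if i % 2 == 0 else '*'
def maskLettersLoop (i : Nat) (acc : List Char) : List Char → List Char
  | [] => acc
  | c :: rest => maskLettersLoop (i + 1) (if i % 2 == 0 then acc ++ [c] else acc ++ ['*']) rest

def mask_letters (data : String) : String := String.mk (maskLettersLoop 0 [] data.toList)

-- ===== PORT B =====
-- lst[1::2] = '*' * (len//2): the strided assignment keeps even slots and stars odd ones, two per step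
def maskStride : List Char → List Char
  | [] => []
  | [a] => [a]
  | a :: _ :: rest => a :: '*' :: maskStride rest

def mask_letters_alt (data : String) : String := String.mk (maskStride data.toList)

-- ===== PRECONDITION & SPEC =====
def Spec_mask_letters (data : String) (out : String) : Prop := out = mask_letters_alt data
instance (data : String) (out : String) : Decidable (Spec_mask_letters data out) := by unfold Spec_mask_letters; infer_instance

-- ===== CLAIM (what is proved, stated in full; the proofs are below) =====
def Claim_equal_mask_letters : Prop := ∀ (data : String), Dom_mask_letters data → Spec_mask_letters data (mask_letters data)

-- ===== LEMMAS AND PROOFS =====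
lemma maskLettersLoop_eq (l : List Char) : ∀ (i : Nat) (acc : List Char), i % 2 = 0 →
    maskLettersLoop i acc l = acc ++ maskStride l := by
  induction l using maskStride.induct with
  | case1 => intro i acc _; simp [maskLettersLoop, maskStride]
  | case2 a => intro i acc h; simp [maskLettersLoop, maskStride, h]
  | case3 a b rest ih =>
    intro i acc h
    have h1 : (i + 1) % 2 = 1 := by omega
    have h2 : (i + 2) % 2 = 0 := by omega
    simp [maskLettersLoop, maskStride, h, h1, ih (i + 2) _ h2]

-- ===== VERDICT (by name: the statement is the Claim_ definition above) =====
theorem mask_letters_spec : Claim_equal_mask_letters := by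
  intro data _
  unfold Spec_mask_letters mask_letters mask_letters_alt
  rw [maskLettersLoop_eq _ 0 [] rfl]
  rfl
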